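-- pv_equiv track=rewrite | github.com/epilectrik/voynich | phases/exploration/a_b_hazard_correlation.py | compute_vocabulary_overlap
-- ===== SOURCE A (Python) =====
-- def compute_vocabulary_overlap(a_vocab, b_folios):
--     """Compute which A vocabulary appears in each B folio."""
--     b_all_vocab = set()
--     for tokens in b_folios.values():
--         b_all_vocab.update(tokens)
--
--     shared_vocab = a_vocab & b_all_vocab
--
--     # For each B folio, compute overlap with A vocabulary
--     folio_overlap = {}
--     for folio, tokens in b_folios.items():
--         folio_vocab = set(tokens)
--         overlap = folio_vocab & a_vocab
--         folio_overlap[folio] = overlap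
--
--     return shared_vocab, folio_overlap
-- ===== SOURCE B (Python) =====
-- def compute_vocabulary_overlap(a_vocab, b_folios):
--     """Single pass: build per-folio overlaps directly, then derive the shared
--     vocabulary from those overlaps instead of from a precomputed union of all
--     B tokens."""
--     folio_overlap = {}
--     for folio, tokens in b_folios.items():
--         folio_overlap[folio] = {t for t in tokens if t in a_vocab}
--     shared_vocab = {w for w in a_vocab
--                     if any(w in ov for ov in folio_overlap.values())}
--     return shared_vocab, folio_overlap
-- ===== Notes on version B (the rewrite author's own statement) =====
-- stated objective: simpler
-- what changed: B drops A's separate union-building pass over all folio tokens: one loop filters each folio's tokens against a_vocab to build the per-folio overlaps, and the shared vocabulary is then derived from those overlaps (a word is shared iff it lies in some folio overlap) instead of intersecting a_vocab with a precomputed global union of all tokens.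
import Mathlib
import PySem

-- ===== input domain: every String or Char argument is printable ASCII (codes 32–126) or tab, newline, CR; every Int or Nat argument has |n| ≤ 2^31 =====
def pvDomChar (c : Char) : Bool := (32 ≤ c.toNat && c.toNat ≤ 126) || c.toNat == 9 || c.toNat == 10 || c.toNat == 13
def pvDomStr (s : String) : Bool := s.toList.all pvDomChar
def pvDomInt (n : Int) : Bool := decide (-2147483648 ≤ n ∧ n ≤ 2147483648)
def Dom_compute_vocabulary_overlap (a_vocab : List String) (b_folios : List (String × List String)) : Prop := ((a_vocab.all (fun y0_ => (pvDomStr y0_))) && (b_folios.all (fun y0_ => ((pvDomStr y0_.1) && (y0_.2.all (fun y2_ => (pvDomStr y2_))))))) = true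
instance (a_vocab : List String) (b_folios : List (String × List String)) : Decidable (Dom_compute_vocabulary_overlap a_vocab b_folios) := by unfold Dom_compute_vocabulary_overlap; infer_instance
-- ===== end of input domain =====

-- B replaces A's separate union-of-all-tokens pass by one loop building the per-folio
-- overlaps directly, deriving the shared vocabulary from those overlaps (simpler decomposition).


-- ===== PORT A =====
-- b_folios is a Python dict, received as an association list: Dict.ofList restores dict semantics.
def compute_vocabulary_overlap (a_vocab : List String) (b_folios : List (String × List String)) : List String × (List (String × List String)) :=
  let d := PySem.Dict.ofList b_folios
  -- b_all_vocab = set(); for tokens in b_folios.values(): b_all_vocab.update(tokens)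
  let b_all_vocab : PySem.Set String :=
    d.values.foldl (fun s tokens => PySem.Set.update s tokens) PySem.Set.empty
  -- shared_vocab = a_vocab & b_all_vocab
  let shared_vocab : PySem.Set String := PySem.Set.inter a_vocab b_all_vocab
  -- folio_overlap = {}; for folio, tokens in b_folios.items(): folio_overlap[folio] = set(tokens) & a_vocab
  let folio_overlap : PySem.Dict String (List String) :=
    d.items.foldl
      (fun fo p => fo.insert p.1 (PySem.Set.inter (PySem.Set.ofList p.2) a_vocab))
      PySem.Dict.empty
  (shared_vocab, folio_overlap.items)

-- ===== PORT B =====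
def compute_vocabulary_overlap_alt (a_vocab : List String) (b_folios : List (String × List String)) : List String × (List (String × List String)) :=
  let d := PySem.Dict.ofList b_folios
  -- folio_overlap = {}; for folio, tokens in b_folios.items(): folio_overlap[folio] = {t for t in tokens if t in a_vocab}
  let folio_overlap : PySem.Dict String (List String) :=
    d.items.foldl
      (fun fo p => fo.insert p.1 (PySem.Set.ofList (p.2.filter (fun t => a_vocab.contains t))))
      PySem.Dict.empty
  -- shared_vocab = {w for w in a_vocab if any(w in ov for ov in folio_overlap.values())}
  let shared_vocab : PySem.Set String :=
    PySem.Set.ofList (a_vocab.filter (fun w => folio_overlap.values.any (fun ov => ov.contains w)))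
  (shared_vocab, folio_overlap.items)

-- ===== PRECONDITION & SPEC =====
-- a_vocab is a Python set: a Lean list with duplicate elements represents no Python input,
-- so Pre_ requires it to be duplicate-free (every real call of A satisfies this).
def Pre_compute_vocabulary_overlap (a_vocab : List String) (b_folios : List (String × List String)) : Prop :=
  a_vocab.Nodup
instance (a_vocab : List String) (b_folios : List (String × List String)) : Decidable (Pre_compute_vocabulary_overlap a_vocab b_folios) := by unfold Pre_compute_vocabulary_overlap; infer_instance

def pvWitness_compute_vocabulary_overlap : List String × (List (String × List String)) :=
  (["daiin", "chol"], [("f1r", ["daiin", "qokeey", "daiin"]), ("f1v", ["chol"])])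

def Spec_compute_vocabulary_overlap (a_vocab : List String) (b_folios : List (String × List String)) (out : List String × (List (String × List String))) : Prop := out = compute_vocabulary_overlap_alt a_vocab b_folios
instance (a_vocab : List String) (b_folios : List (String × List String)) (out : List String × (List (String × List String))) : Decidable (Spec_compute_vocabulary_overlap a_vocab b_folios out) := by unfold Spec_compute_vocabulary_overlap; infer_instance

-- ===== CLAIM (what is proved, stated in full; the proofs are below) =====
def Claim_equal_compute_vocabulary_overlap : Prop := ∀ (a_vocab : List String) (b_folios : List (String × List String)), Dom_compute_vocabulary_overlap a_vocab b_folios → Pre_compute_vocabulary_overlap a_vocab b_folios → Spec_compute_vocabulary_overlap a_vocab b_folios (compute_vocabulary_overlap a_vocab b_folios)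

-- ===== LEMMAS AND PROOFS =====

-- filter commutes with Set.add (set-comprehension vs intersection of a built set)
theorem pv_filter_add {α : Type} [BEq α] [LawfulBEq α] (s : List α) (x : α) (p : α → Bool) :
    (PySem.Set.add s x).filter p = if p x then PySem.Set.add (s.filter p) x else s.filter p := by
  simp only [PySem.Set.add]
  by_cases hc : s.contains x <;> by_cases hp : p x <;>
    simp_all [List.filter_append, List.mem_filter]

theorem pv_filter_foldl_add {α : Type} [BEq α] [LawfulBEq α] (xs s : List α) (p : α → Bool) :
    (xs.foldl PySem.Set.add s).filter p = (xs.filter p).foldl PySem.Set.add (s.filter p) := by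
  induction xs generalizing s with
  | nil => rfl
  | cons x xs ih =>
    by_cases hp : p x <;> simp [List.foldl_cons, ih, pv_filter_add, hp]

theorem pv_ofList_filter {α : Type} [BEq α] [LawfulBEq α] (xs : List α) (p : α → Bool) :
    (PySem.Set.ofList xs).filter p = PySem.Set.ofList (xs.filter p) := by
  simpa [PySem.Set.ofList, PySem.Set.empty] using pv_filter_foldl_add xs [] p

-- membership in A's union-building loop
theorem pv_mem_foldl_update {α : Type} [BEq α] [LawfulBEq α]
    (ls : List (List α)) (s : PySem.Set α) (w : α) :
    w ∈ ls.foldl (fun s t => PySem.Set.update s t) s ↔ w ∈ s ∨ ∃ t ∈ ls, w ∈ t := by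
  induction ls generalizing s with
  | nil => simp
  | cons t ls ih =>
    simp [List.foldl_cons, ih, PySem.Set.mem_update, or_assoc]

-- ===== VERDICT (by name: the statement is the Claim_ definition above) =====
theorem compute_vocabulary_overlap_spec : Claim_equal_compute_vocabulary_overlap := by
  intro a_vocab b_folios _ hpre
  unfold Spec_compute_vocabulary_overlap compute_vocabulary_overlap compute_vocabulary_overlap_alt
  simp only []
  set d := PySem.Dict.ofList b_folios
  have hkeys : (d.items.map Prod.fst).Nodup := PySem.Dict.nodup_keys_ofList b_folios
  have hfresh : ∀ p ∈ d.items, (PySem.Dict.empty : PySem.Dict String (List String)).contains p.1 = false := by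
    intro p _; rfl
  -- both folio loops append fresh keys
  have hA := PySem.Dict.items_foldl_insert_fresh d.items Prod.fst
      (fun p => PySem.Set.inter (PySem.Set.ofList p.2) a_vocab) PySem.Dict.empty hfresh hkeys
  have hB := PySem.Dict.items_foldl_insert_fresh d.items Prod.fst
      (fun p => PySem.Set.ofList (p.2.filter (fun t => a_vocab.contains t))) PySem.Dict.empty hfresh hkeys
  -- the per-folio values agree
  have hval : ∀ p : String × List String,
      PySem.Set.inter (PySem.Set.ofList p.2) a_vocab
        = PySem.Set.ofList (p.2.filter (fun t => a_vocab.contains t)) := by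
    intro p; simpa [PySem.Set.inter] using pv_ofList_filter p.2 (fun t => a_vocab.contains t)
  have hitems :
      (d.items.foldl (fun fo p => fo.insert p.1 (PySem.Set.inter (PySem.Set.ofList p.2) a_vocab)) PySem.Dict.empty).items
        = (d.items.foldl (fun fo p => fo.insert p.1 (PySem.Set.ofList (p.2.filter (fun t => a_vocab.contains t)))) PySem.Dict.empty).items := by
    rw [hA, hB]; simp [hval]
  -- the shared vocabularies agree
  have hB' : (d.items.foldl (fun fo p => fo.insert p.1 (PySem.Set.ofList (p.2.filter (fun t => a_vocab.contains t)))) PySem.Dict.empty).items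
      = d.items.map (fun p => (p.1, PySem.Set.ofList (p.2.filter (fun t => a_vocab.contains t)))) := by
    simpa using hB
  have hshared :
      PySem.Set.inter a_vocab
          (d.values.foldl (fun s tokens => PySem.Set.update s tokens) PySem.Set.empty)
        = PySem.Set.ofList (a_vocab.filter (fun w =>
            (d.items.foldl (fun fo p => fo.insert p.1 (PySem.Set.ofList (p.2.filter (fun t => a_vocab.contains t)))) PySem.Dict.empty).values.any
              (fun ov => ov.contains w))) := by
    rw [PySem.Set.ofList_eq_self_of_nodup _ (hpre.filter _)]
    simp only [PySem.Set.inter]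
    refine List.filter_congr ?_
    intro w hw
    have hvalues : (d.items.foldl (fun fo p => fo.insert p.1 (PySem.Set.ofList (p.2.filter (fun t => a_vocab.contains t)))) PySem.Dict.empty).values
        = d.items.map (fun p => PySem.Set.ofList (p.2.filter (fun t => a_vocab.contains t))) := by
      simp only [PySem.Dict.values, hB', List.map_map]
      rfl
    have hmem : w ∈ (d.values.foldl (fun s tokens => PySem.Set.update s tokens) PySem.Set.empty)
        ↔ ∃ t ∈ d.values, w ∈ t := by
      simpa [PySem.Set.empty] using pv_mem_foldl_update d.values [] w
    rw [Bool.eq_iff_iff, hvalues]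
    simp only [PySem.Set.contains_iff, List.any_eq_true, List.mem_map]
    rw [hmem]
    constructor
    · rintro ⟨t, ht, hwt⟩
      obtain ⟨p, hp, rfl⟩ := List.mem_map.1 ht
      refine ⟨_, ⟨p, hp, rfl⟩, ?_⟩
      rw [PySem.Set.mem_ofList, List.mem_filter]
      exact ⟨hwt, List.contains_iff_mem.2 hw⟩
    · rintro ⟨x, ⟨p, hp, rfl⟩, hwx⟩
      rw [PySem.Set.mem_ofList, List.mem_filter] at hwx
      exact ⟨p.2, List.mem_map.2 ⟨p, hp, rfl⟩, hwx.1⟩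
  exact Prod.ext hshared hitems
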